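-- pv_equiv track=rewrite | github.com/Sum-Outman/Self-Soul | core/neuro_symbolic/first_order_logic_reasoner.py | _find_connective_position
-- ===== SOURCE A (Python) =====
-- def _find_connective_position(formula_str: str, connective: str) -> int:
--     """查找连接词的位置（考虑括号嵌套）"""
--     parentheses_level = 0
--     i = 0
--
--     while i < len(formula_str):
--         char = formula_str[i]
--
--         if char == '(':
--             parentheses_level += 1
--         elif char == ')':
--             parentheses_level -= 1
--         elif parentheses_level == 0:
--             # 检查是否匹配连接词
--             if formula_str[i:i+len(connective)] == connective:
--                 # 确保连接词前后是空格或是字符串边界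
--                 prev_char = formula_str[i-1] if i > 0 else ' '
--                 next_char = formula_str[i+len(connective)] if i+len(connective) < len(formula_str) else ' '
--
--                 if prev_char.isspace() and next_char.isspace():
--                     return i
--
--         i += 1
--
--     return -1
-- ===== SOURCE B (Python) =====
-- def _find_connective_position(formula_str: str, connective: str) -> int:
--     """Locate-then-verify: jump between str.find candidates instead of scanning char by char."""
--     n = len(formula_str)
--     pos = 0
--     while True:
--         idx = formula_str.find(connective, pos)
--         if idx == -1 or idx >= n:
--             return -1
--         prefix = formula_str[:idx]
--         if (formula_str[idx] not in '()'
--                 and prefix.count('(') == prefix.count(')')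
--                 and (formula_str[idx - 1] if idx > 0 else ' ').isspace()
--                 and (formula_str[idx + len(connective)] if idx + len(connective) < n else ' ').isspace()):
--             return idx
--         pos = idx + 1
-- ===== Notes on version B (the rewrite author's own statement) =====
-- stated objective: faster
-- what changed: Replaces A's Python-level char-by-char scan with a live parenthesis-depth counter by a locate-then-verify loop: str.find jumps straight to each candidate occurrence, which is accepted iff its prefix has balanced parenthesis counts, it does not start at a parenthesis, and both boundaries are whitespace.
import Mathlib
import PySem

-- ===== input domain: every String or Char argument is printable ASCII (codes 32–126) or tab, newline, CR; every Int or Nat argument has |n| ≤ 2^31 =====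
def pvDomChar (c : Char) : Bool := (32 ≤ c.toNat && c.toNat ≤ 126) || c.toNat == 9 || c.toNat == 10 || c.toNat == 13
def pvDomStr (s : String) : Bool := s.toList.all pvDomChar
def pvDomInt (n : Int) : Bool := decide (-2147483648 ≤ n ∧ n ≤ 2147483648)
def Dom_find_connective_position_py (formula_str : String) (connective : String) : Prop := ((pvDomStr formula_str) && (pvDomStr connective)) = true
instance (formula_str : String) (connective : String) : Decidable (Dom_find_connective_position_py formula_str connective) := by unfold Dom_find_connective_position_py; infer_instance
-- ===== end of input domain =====

-- B replaces A's char-by-char scan (live depth counter) with a locate-then-verify loop over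
-- str.find candidates (measurably faster in CPython); the return values are proved identical on all inputs.

-- ===== PORT A =====
-- A: single pass over the characters with a live parenthesis-depth counter.
def pvALoop (s c : List Char) (i : Nat) (depth : Int) : Int :=
  if h : i < s.length then
    if s[i] = '(' then pvALoop s c (i + 1) (depth + 1)
    else if s[i] = ')' then pvALoop s c (i + 1) (depth - 1)
    else if depth = 0 then
      if PySem.List.slice s (some (i : Int)) (some ((i : Int) + (c.length : Int))) = c then
        if PySem.Chars.isspace (if 0 < i then PySem.List.pyGetD s ((i : Int) - 1) ' ' else ' ') &&
           PySem.Chars.isspace (if i + c.length < s.length then PySem.List.pyGetD s ((i : Int) + (c.length : Int)) ' ' else ' ')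
        then (i : Int)
        else pvALoop s c (i + 1) depth
      else pvALoop s c (i + 1) depth
    else pvALoop s c (i + 1) depth
  else -1
termination_by s.length - i

def find_connective_position_py (formula_str : String) (connective : String) : Int :=
  pvALoop formula_str.toList connective.toList 0 0

-- ===== PORT B =====
-- B: str.find jumps from candidate occurrence to candidate occurrence; each candidate is
-- verified by prefix parenthesis counts and boundary whitespace.
def pvBLoop (s c : List Char) (pos : Nat) (hpos : pos ≤ s.length) : Int :=
  if h : PySem.Chars.findFrom s c (pos : Int) none = -1 ∨ (s.length : Int) ≤ PySem.Chars.findFrom s c (pos : Int) none then -1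
  else
    if PySem.List.pyGetD s (PySem.Chars.findFrom s c (pos : Int) none) ' ' ≠ '(' ∧
       PySem.List.pyGetD s (PySem.Chars.findFrom s c (pos : Int) none) ' ' ≠ ')' ∧
       PySem.Chars.count (PySem.List.slice s none (some (PySem.Chars.findFrom s c (pos : Int) none))) ['('] =
         PySem.Chars.count (PySem.List.slice s none (some (PySem.Chars.findFrom s c (pos : Int) none))) [')'] ∧
       PySem.Chars.isspace (if 0 < (PySem.Chars.findFrom s c (pos : Int) none).toNat then PySem.List.pyGetD s (PySem.Chars.findFrom s c (pos : Int) none - 1) ' ' else ' ') = true ∧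
       PySem.Chars.isspace (if (PySem.Chars.findFrom s c (pos : Int) none).toNat + c.length < s.length then PySem.List.pyGetD s (PySem.Chars.findFrom s c (pos : Int) none + (c.length : Int)) ' ' else ' ') = true
    then PySem.Chars.findFrom s c (pos : Int) none
    else pvBLoop s c ((PySem.Chars.findFrom s c (pos : Int) none).toNat + 1) (by
      simp only [not_or, not_le] at h
      have hspec := PySem.Chars.findFrom_natCast_spec s c pos hpos h.1
      omega)
termination_by s.length - pos
decreasing_by
  simp only [not_or, not_le] at h
  have hspec := PySem.Chars.findFrom_natCast_spec s c pos hpos h.1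
  omega

def find_connective_position_py_alt (formula_str : String) (connective : String) : Int :=
  pvBLoop formula_str.toList connective.toList 0 (Nat.zero_le _)

-- ===== PRECONDITION & SPEC =====
def Spec_find_connective_position_py (formula_str : String) (connective : String) (out : Int) : Prop := out = find_connective_position_py_alt formula_str connective
instance (formula_str : String) (connective : String) (out : Int) : Decidable (Spec_find_connective_position_py formula_str connective out) := by unfold Spec_find_connective_position_py; infer_instance

-- ===== CLAIM (what is proved, stated in full; the proofs are below) =====
def Claim_equal_find_connective_position_py : Prop := ∀ (formula_str : String) (connective : String), Dom_find_connective_position_py formula_str connective → Spec_find_connective_position_py formula_str connective (find_connective_position_py formula_str connective)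

-- ===== LEMMAS AND PROOFS =====

-- Reference description: pvOk s c i says index i is accepted (head not a parenthesis,
-- balanced prefix, the match, whitespace boundaries); both loops return the first accepted index.
def pvOk (s c : List Char) (i : Nat) : Bool :=
  decide (i < s.length) &&
  (PySem.List.pyGetD s (i : Int) ' ' != '(') && (PySem.List.pyGetD s (i : Int) ' ' != ')') &&
  decide ((s.take i).count '(' = (s.take i).count ')') &&
  decide (c <+: s.drop i) &&
  PySem.Chars.isspace (if 0 < i then PySem.List.pyGetD s ((i : Int) - 1) ' ' else ' ') &&
  PySem.Chars.isspace (if i + c.length < s.length then PySem.List.pyGetD s ((i : Int) + (c.length : Int)) ' ' else ' ')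

def pvFirst (s c : List Char) (i : Nat) : Int :=
  if h : i < s.length then (if pvOk s c i then (i : Int) else pvFirst s c (i + 1)) else -1
termination_by s.length - i

theorem pvFirst_of_ge (s c : List Char) (i : Nat) (h : s.length ≤ i) : pvFirst s c i = -1 := by
  unfold pvFirst
  simp [Nat.not_lt.mpr h]

theorem pvFirst_skip (s c : List Char) (p q : Nat) (hpq : p ≤ q)
    (hok : ∀ j, p ≤ j → j < q → pvOk s c j = false) : pvFirst s c p = pvFirst s c q := by
  obtain ⟨k, rfl⟩ := Nat.exists_eq_add_of_le hpq
  induction k generalizing p with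
  | zero => rfl
  | succ n ih =>
    by_cases hp : p < s.length
    · rw [pvFirst, dif_pos hp, if_neg (by simp [hok p le_rfl (by omega)])]
      have := ih (p + 1) (by omega) (fun j h1 h2 => hok j (by omega) (by omega))
      rw [show p + 1 + n = p + (n + 1) by omega] at this
      exact this
    · rw [pvFirst_of_ge s c p (by omega), pvFirst_of_ge s c _ (by omega)]

theorem getD_eq (s : List Char) (i : Nat) (h : i < s.length) : s.getD i ' ' = s[i] := by
  simp [List.getD_eq_getElem?_getD, List.getElem?_eq_getElem h]

theorem pyGetD_cast_eq (s : List Char) (i : Nat) (h : i < s.length) :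
    PySem.List.pyGetD s (i : Int) ' ' = s[i] := by
  rw [PySem.List.pyGetD_natCast]; exact getD_eq s i h

theorem count_take_succ (s : List Char) (i : Nat) (h : i < s.length) (x : Char) :
    (s.take (i + 1)).count x = (s.take i).count x + (if s[i] = x then 1 else 0) := by
  have ht : s.take (i + 1) = s.take i ++ [s[i]] := by
    rw [List.take_add_one, List.getElem?_eq_getElem h]
    simp
  rw [ht, List.count_append]
  by_cases hx : s[i] = x
  · simp [hx]
  · have hz : List.count x [s[i]] = 0 := List.count_eq_zero.mpr (by
      simp only [List.mem_singleton]
      exact fun e => hx e.symm)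
    simp [hx, hz]

theorem count_go_singleton (a : Char) (fuel : Nat) : ∀ (l : List Char) (acc : Nat), l.length ≤ fuel →
    PySem.Chars.count.go [a] fuel l acc = acc + l.count a := by
  induction fuel with
  | zero =>
    intro l acc h
    have : l = [] := List.eq_nil_of_length_eq_zero (by omega)
    subst this; simp [PySem.Chars.count.go]
  | succ n ih =>
    intro l acc h
    cases l with
    | nil => simp [PySem.Chars.count.go]
    | cons x t =>
      rw [PySem.Chars.count.go]
      by_cases hx : x = a
      · subst hx
        simp [List.isPrefixOf, ih t _ (by simpa using h)]
        omega
      · simp [List.isPrefixOf, hx, Ne.symm hx, ih t _ (by simpa using h)]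

theorem count_singleton (a : Char) (l : List Char) :
    PySem.Chars.count l [a] = l.count a := by
  rw [PySem.Chars.count]
  simp [count_go_singleton a l.length l 0 le_rfl]

theorem prefix_of_slice_eq (s c : List Char) (i : Nat)
    (h : PySem.List.slice s (some (i : Int)) (some ((i : Int) + (c.length : Int))) = c) :
    c <+: s.drop i := by
  rw [PySem.List.slice_natCast_add] at h
  exact List.prefix_iff_eq_take.mpr h.symm

theorem pvOk_false_of_not_prefix (s c : List Char) (j : Nat) (h : ¬ c <+: s.drop j) :
    pvOk s c j = false := by
  simp [pvOk, h]

theorem not_prefix_of_not_infix (s c : List Char) (pos j : Nat) (hj : pos ≤ j)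
    (hinf : ¬ c <:+: s.drop pos) : ¬ c <+: s.drop j := by
  intro hp
  refine hinf (List.infix_iff_prefix_suffix.mpr ⟨s.drop j, hp, ?_⟩)
  rw [show s.drop j = (s.drop pos).drop (j - pos) by rw [List.drop_drop]; congr 1; omega]
  exact List.drop_suffix _ _

theorem pvALoop_eq (s c : List Char) (i : Nat) (d : Int)
    (hd : d = ((s.take i).count '(' : Int) - ((s.take i).count ')' : Int)) :
    pvALoop s c i d = pvFirst s c i := by
  fun_induction pvALoop s c i d with
  | case1 i d h h1 ih =>
    rw [pvFirst, dif_pos h, if_neg (by simp [pvOk, pyGetD_cast_eq s i h, h1])]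
    exact ih (by rw [count_take_succ s i h, count_take_succ s i h, h1]; simp; omega)
  | case2 i d h h1 h2 ih =>
    rw [pvFirst, dif_pos h, if_neg (by simp [pvOk, pyGetD_cast_eq s i h, h2])]
    exact ih (by rw [count_take_succ s i h, count_take_succ s i h, h2]; simp; omega)
  | case3 i h h1 h2 hsl hsp =>
    rw [Bool.and_eq_true] at hsp
    have hok : pvOk s c i = true := by
      unfold pvOk
      simp only [Bool.and_eq_true, bne_iff_ne, decide_eq_true_eq, pyGetD_cast_eq s i h]
      exact ⟨⟨⟨⟨⟨⟨h, h1⟩, h2⟩, by omega⟩, prefix_of_slice_eq s c i hsl⟩, hsp.1⟩, hsp.2⟩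
    rw [pvFirst, dif_pos h, if_pos hok]
  | case4 i h h1 h2 hsl hsp ih =>
    have hok : pvOk s c i = false := by
      rw [Bool.eq_false_iff]
      intro hcon
      unfold pvOk at hcon
      simp only [Bool.and_eq_true] at hcon
      exact hsp (by rw [Bool.and_eq_true]; exact ⟨hcon.1.2, hcon.2⟩)
    rw [pvFirst, dif_pos h, if_neg (by simp [hok])]
    refine Eq.trans (ih ?_) rfl
    rw [count_take_succ s i h, count_take_succ s i h]; simp [h1, h2]; omega
  | case5 i h h1 h2 hsl ih =>
    have hok : pvOk s c i = false := pvOk_false_of_not_prefix s c i (fun hp => hsl (by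
      rw [PySem.List.slice_natCast_add]
      exact (List.prefix_iff_eq_take.mp hp).symm))
    rw [pvFirst, dif_pos h, if_neg (by simp [hok])]
    refine Eq.trans (ih ?_) rfl
    rw [count_take_succ s i h, count_take_succ s i h]; simp [h1, h2]; omega
  | case6 i d h h1 h2 hd0 ih =>
    have hok : pvOk s c i = false := by
      have hne : ¬ ((s.take i).count '(' = (s.take i).count ')') := by omega
      simp [pvOk, hne]
    rw [pvFirst, dif_pos h, if_neg (by simp [hok])]
    refine Eq.trans (ih ?_) rfl
    rw [count_take_succ s i h, count_take_succ s i h]; simp [h1, h2]; omega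
  | case7 i d h =>
    rw [pvFirst_of_ge s c i (by omega)]

theorem pvBLoop_eq (s c : List Char) (pos : Nat) (hpos : pos ≤ s.length) :
    pvBLoop s c pos hpos = pvFirst s c pos := by
  fun_induction pvBLoop s c pos hpos with
  | case1 pos hpos h =>
    rw [pvFirst_skip s c pos s.length hpos ?_, pvFirst_of_ge s c _ le_rfl]
    intro j hj1 hj2
    rcases h with h | h
    · have hinf := (PySem.Chars.findFrom_natCast_eq_neg_one_iff s c pos hpos).mp h
      exact pvOk_false_of_not_prefix s c j (not_prefix_of_not_infix s c pos j hj1 hinf)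
    · by_cases hne : PySem.Chars.findFrom s c (pos : Int) none = -1
      · have hinf := (PySem.Chars.findFrom_natCast_eq_neg_one_iff s c pos hpos).mp hne
        exact pvOk_false_of_not_prefix s c j (not_prefix_of_not_infix s c pos j hj1 hinf)
      · have hspec := PySem.Chars.findFrom_natCast_spec s c pos hpos hne
        exact pvOk_false_of_not_prefix s c j (hspec.2.2 j hj1 (by omega))
  | case2 pos hpos h cond =>
    simp only [not_or, not_le] at h
    have hspec := PySem.Chars.findFrom_natCast_spec s c pos hpos h.1
    have h0 : 0 ≤ PySem.Chars.findFrom s c (pos : Int) none := le_trans (by omega) hspec.1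
    obtain ⟨j, hfj⟩ : ∃ j : Nat, PySem.Chars.findFrom s c (pos : Int) none = (j : Int) :=
      ⟨_, (Int.toNat_of_nonneg h0).symm⟩
    rw [hfj] at cond hspec h ⊢
    simp only [Int.toNat_natCast] at cond hspec
    have hjlen : j < s.length := by exact_mod_cast h.2
    have hposj : pos ≤ j := by exact_mod_cast hspec.1
    rw [PySem.List.slice_to s (by omega : (0 : Int) ≤ (j : Int))] at cond
    simp only [dite_eq_ite] at cond
    simp only [Int.toNat_natCast, count_singleton] at cond
    have hok : pvOk s c j = true := by
      unfold pvOk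
      simp only [Bool.and_eq_true, bne_iff_ne, decide_eq_true_eq]
      exact ⟨⟨⟨⟨⟨⟨hjlen, cond.1⟩, cond.2.1⟩, cond.2.2.1⟩, hspec.2.1⟩, cond.2.2.2.1⟩, cond.2.2.2.2⟩
    rw [pvFirst_skip s c pos j hposj
      (fun k hk1 hk2 => pvOk_false_of_not_prefix s c k (hspec.2.2 k hk1 hk2))]
    rw [pvFirst, dif_pos hjlen, if_pos hok]
  | case3 pos hpos h cond ih =>
    simp only [not_or, not_le] at h
    have hspec := PySem.Chars.findFrom_natCast_spec s c pos hpos h.1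
    have h0 : 0 ≤ PySem.Chars.findFrom s c (pos : Int) none := le_trans (by omega) hspec.1
    obtain ⟨j, hfj⟩ : ∃ j : Nat, PySem.Chars.findFrom s c (pos : Int) none = (j : Int) :=
      ⟨_, (Int.toNat_of_nonneg h0).symm⟩
    rw [ih, hfj] at ⊢
    rw [hfj] at cond hspec h
    simp only [Int.toNat_natCast] at cond hspec ⊢
    have hjlen : j < s.length := by exact_mod_cast h.2
    have hposj : pos ≤ j := by exact_mod_cast hspec.1
    rw [PySem.List.slice_to s (by omega : (0 : Int) ≤ (j : Int))] at cond
    simp only [dite_eq_ite] at cond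
    simp only [Int.toNat_natCast, count_singleton] at cond
    have hokj : pvOk s c j = false := by
      rw [Bool.eq_false_iff]
      intro hcon
      unfold pvOk at hcon
      simp only [Bool.and_eq_true, bne_iff_ne, decide_eq_true_eq] at hcon
      exact cond ⟨hcon.1.1.1.1.1.2, hcon.1.1.1.1.2, hcon.1.1.1.2, hcon.1.2, hcon.2⟩
    refine (pvFirst_skip s c pos (j + 1) (by omega) ?_).symm
    intro k hk1 hk2
    by_cases hkj : k = j
    · subst hkj; exact hokj
    · exact pvOk_false_of_not_prefix s c k (hspec.2.2 k hk1 (by omega))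

-- ===== VERDICT (by name: the statement is the Claim_ definition above) =====
theorem find_connective_position_py_spec : Claim_equal_find_connective_position_py := by
  intro f c _
  unfold Spec_find_connective_position_py find_connective_position_py find_connective_position_py_alt
  rw [pvALoop_eq _ _ 0 0 (by simp), pvBLoop_eq]
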